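-- pv_equiv track=rewrite | github.com/HalfPunch/yandex-algoritm-training-6-homework | homework-2/F-triplet-product-sum.py | find_triple_sums
-- ===== SOURCE A (Python) =====
-- def find_triple_sums(arr: [int], arr_len):
--     current_sum = 0
--     left_array_sum = arr[0]
--     right_array_sum = sum(arr) - arr[0]
--     for pointer in range(1, arr_len - 1):
--         right_array_sum -= arr[pointer]
--         current_sum += left_array_sum * arr[pointer] * right_array_sum
--         left_array_sum += arr[pointer]
--     return current_sum
-- ===== SOURCE B (Python) =====
-- def find_triple_sums(arr: [int], arr_len):
--     # Closed form: the loop's total is e3(prefix) + e2(prefix) * (sum of the tail),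
--     # where prefix = arr[:arr_len-1]; e2/e3 come from power sums via Newton's identities.
--     if arr_len <= 2:
--         return 0
--     k = arr_len - 1
--     b = arr[:k]
--     p1 = sum(b)
--     p2 = sum(x * x for x in b)
--     p3 = sum(x ** 3 for x in b)
--     rest = sum(arr[k:])
--     return (p1 ** 3 - 3 * p1 * p2 + 2 * p3) // 6 + (p1 * p1 - p2) // 2 * rest
-- ===== Notes on version B (the rewrite author's own statement) =====
-- stated objective: alternative
-- what changed: Replaces the incremental left/right running-sum loop over middle indices by a closed-form symmetric-polynomial identity: three independent power sums p1,p2,p3 over arr[:arr_len-1] give e3 and e2 via Newton's identities, and the answer is e3 + e2*sum(arr[arr_len-1:]).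
import Mathlib
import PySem

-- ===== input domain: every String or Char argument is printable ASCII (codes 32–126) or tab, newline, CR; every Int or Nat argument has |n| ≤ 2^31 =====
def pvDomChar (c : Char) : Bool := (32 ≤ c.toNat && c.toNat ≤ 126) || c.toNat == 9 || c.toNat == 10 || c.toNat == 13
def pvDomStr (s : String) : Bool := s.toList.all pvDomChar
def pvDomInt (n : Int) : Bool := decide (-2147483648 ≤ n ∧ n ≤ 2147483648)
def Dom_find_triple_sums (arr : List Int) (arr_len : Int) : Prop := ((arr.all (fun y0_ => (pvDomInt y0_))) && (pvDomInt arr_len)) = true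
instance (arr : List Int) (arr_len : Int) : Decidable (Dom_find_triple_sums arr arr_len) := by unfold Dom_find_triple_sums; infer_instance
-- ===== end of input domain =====

-- B computes the same value by a closed-form symmetric-polynomial identity (power sums +
-- Newton's identities) instead of A's incremental left/right running-sum loop.

-- ===== PORT A =====
def find_triple_sums (arr : List Int) (arr_len : Int) : Int :=
  -- current_sum = 0; left = arr[0]; right = sum(arr) - arr[0]; loop over range(1, arr_len-1)
  -- arr[0] / arr[pointer] ported with pyGetD: Pre_ guarantees every access is in range.
  let left0 := PySem.List.pyGetD arr 0 0
  let right0 := arr.sum - left0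
  let st := (PySem.List.pyRange 1 (arr_len - 1) 1).foldl
    (fun (s : Int × Int × Int) p =>
      let x := PySem.List.pyGetD arr p 0
      let r := s.2.2 - x
      (s.1 + s.2.1 * x * r, s.2.1 + x, r))
    (0, left0, right0)
  st.1

-- ===== PORT B =====
def find_triple_sums_alt (arr : List Int) (arr_len : Int) : Int :=
  if arr_len ≤ 2 then 0
  else
    let k := arr_len - 1
    let b := PySem.List.slice arr none (some k)
    let p1 := b.sum
    let p2 := (b.map (fun x => x * x)).sum
    let p3 := (b.map (fun x => x * x * x)).sum
    let rest := (PySem.List.slice arr (some k) none).sum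
    PySem.Int.floordiv (p1 * p1 * p1 - 3 * p1 * p2 + 2 * p3) 6 +
      PySem.Int.floordiv (p1 * p1 - p2) 2 * rest

-- ===== PRECONDITION & SPEC =====
-- A raises IndexError on the empty list (arr[0]) and when arr_len > len(arr)+1
-- (arr[pointer] runs past the end); exactly those inputs are excluded.
def Pre_find_triple_sums (arr : List Int) (arr_len : Int) : Prop :=
  arr ≠ [] ∧ arr_len ≤ (arr.length : Int) + 1
instance (arr : List Int) (arr_len : Int) : Decidable (Pre_find_triple_sums arr arr_len) := by
  unfold Pre_find_triple_sums; infer_instance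

def pvWitness_find_triple_sums : List Int × Int := ([2, -3, 5, 7], 4)

def Spec_find_triple_sums (arr : List Int) (arr_len : Int) (out : Int) : Prop :=
  out = find_triple_sums_alt arr arr_len
instance (arr : List Int) (arr_len : Int) (out : Int) : Decidable (Spec_find_triple_sums arr arr_len out) := by
  unfold Spec_find_triple_sums; infer_instance

-- ===== CLAIM (what is proved, stated in full; the proofs are below) =====
def Claim_equal_find_triple_sums : Prop := ∀ (arr : List Int) (arr_len : Int), Dom_find_triple_sums arr arr_len → Pre_find_triple_sums arr arr_len → Spec_find_triple_sums arr arr_len (find_triple_sums arr arr_len)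
-- ===== LEMMAS AND PROOFS =====

/-- Second elementary symmetric polynomial of a list. -/
def esym2 : List Int → Int
  | [] => 0
  | x :: l => x * l.sum + esym2 l

/-- Third elementary symmetric polynomial of a list. -/
def esym3 : List Int → Int
  | [] => 0
  | x :: l => x * esym2 l + esym3 l

/-- A's loop body as a function of the fetched element. -/
def stepF (s : Int × Int × Int) (x : Int) : Int × Int × Int :=
  (s.1 + s.2.1 * x * (s.2.2 - x), s.2.1 + x, s.2.2 - x)

/-- Closed form of A's loop body folded over the list of middle elements. -/
theorem foldA_closed (l : List Int) (C L R : Int) :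
    l.foldl stepF (C, L, R)
      = (C + esym3 l + (R - l.sum) * esym2 l + L * (esym2 l + l.sum * (R - l.sum)),
         L + l.sum, R - l.sum) := by
  induction l generalizing C L R with
  | nil => simp [esym2, esym3]
  | cons x l ih =>
      simp only [List.foldl_cons, stepF, ih, esym2, esym3, List.sum_cons, Prod.mk.injEq]
      refine ⟨by ring, by ring, by ring⟩

theorem two_esym2 (l : List Int) :
    2 * esym2 l = l.sum * l.sum - (l.map (fun x => x * x)).sum := by
  induction l with
  | nil => simp [esym2]
  | cons x l ih =>
      simp only [esym2, List.sum_cons, List.map_cons]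
      linear_combination ih

theorem six_esym3 (l : List Int) :
    6 * esym3 l = l.sum * l.sum * l.sum - 3 * l.sum * (l.map (fun x => x * x)).sum
      + 2 * (l.map (fun x => x * x * x)).sum := by
  induction l with
  | nil => simp [esym3]
  | cons x l ih =>
      simp only [esym3, List.sum_cons, List.map_cons]
      linear_combination ih + 3 * x * two_esym2 l

-- ===== VERDICT (by name: the statement is the Claim_ definition above) =====
theorem find_triple_sums_spec : Claim_equal_find_triple_sums := by
  intro arr arr_len _ hpre
  obtain ⟨hne, hlen⟩ := hpre
  rcases arr with _ | ⟨a0, t⟩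
  · exact absurd rfl hne
  by_cases hsmall : arr_len ≤ 2
  · unfold Spec_find_triple_sums find_triple_sums find_triple_sums_alt
    rw [PySem.List.pyRange_one_eq_nil (by omega)]
    simp [hsmall]
  · simp only [List.length_cons] at hlen
    set k : Int := arr_len - 1 with hk
    have hk2 : 2 ≤ k := by omega
    have hkle : k ≤ ((a0 :: t).length : Int) := by simp; omega
    set b : List Int := (a0 :: t).take k.toNat with hb
    have hlb : PySem.List.len b = k := by
      simp [PySem.List.len, hb, List.length_take]; omega
    -- A's side: loop over range(1, k) fetching arr = loop over b.drop 1
    have hAside : find_triple_sums (a0 :: t) arr_len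
        = (List.foldl stepF (0, a0, (a0 :: t).sum - a0) (b.drop 1)).1 := by
      unfold find_triple_sums
      show ((PySem.List.pyRange 1 (arr_len - 1)).foldl
        (fun acc j => stepF acc (PySem.List.pyGetD (a0 :: t) j 0))
        (0, PySem.List.pyGetD (a0 :: t) 0 0, (a0 :: t).sum - PySem.List.pyGetD (a0 :: t) 0 0)).1 = _
      rw [PySem.List.pyGetD_zero_cons]
      rw [PySem.List.foldl_congr_mem _ _
            (fun acc j => stepF acc (PySem.List.pyGetD b j 0)) _ ?hsw]
      case hsw =>
        intro acc p hp
        have hmem := (PySem.List.mem_pyRange_one).1 hp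
        have h1 : (0:Int) ≤ p := by omega
        have hpk : p < k := by omega
        have hlbn : b.length = k.toNat := by simp [hb, List.length_take]; omega
        have hx : PySem.List.pyGetD (a0 :: t) p 0 = PySem.List.pyGetD b p 0 := by
          rw [PySem.List.pyGetD_eq_getElem (a0 :: t) 0 h1 (by simp; omega),
              PySem.List.pyGetD_eq_getElem b 0 h1 (by rw [hlbn]; omega)]
          simp [hb, List.getElem_take]
        simp only [hx]
      rw [show arr_len - 1 = PySem.List.len b from by omega,
          PySem.List.foldl_pyRange_pyGetD b 0 stepF _ (by omega : (0:Int) ≤ 1)]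
      norm_num
    -- B's side
    have hb0 : b = a0 :: t.take (k.toNat - 1) := by
      rw [hb, show k.toNat = (k.toNat - 1) + 1 from by omega, List.take_succ_cons]
      simp
    set d : List Int := t.take (k.toNat - 1) with hd
    set rest : Int := (t.drop (k.toNat - 1)).sum with hrest
    have hsum : (a0 :: t).sum = a0 + d.sum + rest := by
      have ht : t = d ++ t.drop (k.toNat - 1) := by rw [hd]; simp
      rw [List.sum_cons, hrest]
      conv_lhs => rw [ht]
      simp; ring
    have hBside : find_triple_sums_alt (a0 :: t) arr_len = esym3 b + esym2 b * rest := by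
      unfold find_triple_sums_alt
      rw [if_neg (by omega : ¬ arr_len ≤ 2)]
      show PySem.Int.floordiv _ 6 + PySem.Int.floordiv _ 2 * _ = _
      rw [PySem.List.slice_to _ (by omega : (0:Int) ≤ arr_len - 1),
          PySem.List.slice_from _ (by omega : (0:Int) ≤ arr_len - 1)]
      have hkk : (arr_len - 1).toNat = k.toNat := by omega
      rw [hkk, ← hb]
      have hdropk : (a0 :: t).drop k.toNat = t.drop (k.toNat - 1) := by
        rw [show k.toNat = (k.toNat - 1) + 1 from by omega]; simp
      rw [hdropk, ← hrest]
      have hfd2 : PySem.Int.floordiv (b.sum * b.sum - (b.map (fun x => x * x)).sum) 2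
          = esym2 b := by
        rw [← two_esym2 b]
        show Int.fdiv (2 * esym2 b) 2 = esym2 b
        rw [Int.mul_fdiv_cancel_left _ (by norm_num)]
      have hfd6 : PySem.Int.floordiv (b.sum * b.sum * b.sum
            - 3 * b.sum * (b.map (fun x => x * x)).sum
            + 2 * (b.map (fun x => x * x * x)).sum) 6 = esym3 b := by
        rw [← six_esym3 b]
        show Int.fdiv (6 * esym3 b) 6 = esym3 b
        rw [Int.mul_fdiv_cancel_left _ (by norm_num)]
      rw [hfd2, hfd6]
    unfold Spec_find_triple_sums
    rw [hAside, hBside, hb0, foldA_closed]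
    have he2 : esym2 (a0 :: d) = a0 * d.sum + esym2 d := rfl
    have he3 : esym3 (a0 :: d) = a0 * esym2 d + esym3 d := rfl
    simp only [List.drop_succ_cons, List.drop_zero, he2, he3, hsum]
    ring
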